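-- pv_equiv track=rewrite | github.com/NeverTheSame/AIssist | processor.py | _extract_technical_details
-- ===== SOURCE A (Python) =====
-- def _extract_technical_details(content: str) -> str:
--     """Extract specific technical details from incident content."""
--     content_lower = content.lower()
--     details = []
--
--     # Extract specific technical terms and issues
--     if 'jwt' in content_lower or 'token' in content_lower:
--         details.append('JWT token authentication')
--     if 'impaired communication' in content_lower:
--         details.append('communication issues')
--     if 'authentication' in content_lower:
--         details.append('authentication problems')
--     if 'reset' in content_lower and 'auth' in content_lower:
--         details.append('authentication reset required')
--     if 'machines' in content_lower and any(num in content for num in ['300', '304', '100+', '200+']):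
--         details.append('large scale deployment')
--     if 'defender' in content_lower:
--         details.append('Microsoft Defender for Endpoint')
--     if 'macos' in content_lower or 'mac os' in content_lower:
--         details.append('macOS platform')
--
--     return ', '.join(details) if details else ""
-- ===== SOURCE B (Python) =====
-- _RULES = [
--     ([['jwt', 'token']], 'JWT token authentication'),
--     ([['impaired communication']], 'communication issues'),
--     ([['authentication']], 'authentication problems'),
--     ([['reset'], ['auth']], 'authentication reset required'),
--     ([['machines'], ['300', '304', '100+', '200+']], 'large scale deployment'),
--     ([['defender']], 'Microsoft Defender for Endpoint'),
--     ([['macos', 'mac os']], 'macOS platform'),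
-- ]
--
--
-- def _extract_technical_details(content: str) -> str:
--     low = content.lower()
--     return ', '.join(label for groups, label in _RULES
--                      if all(any(k in low for k in g) for g in groups))
-- ===== Notes on version B (the rewrite author's own statement) =====
-- stated objective: simpler
-- what changed: Replaces the hard-coded chain of seven if/append statements with a declarative rules table (AND-of-OR keyword groups mapped to labels) driven by one comprehension; the numeric tokens are checked in the lowercased content, which is equivalent since they contain no letters.
import Mathlib
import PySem

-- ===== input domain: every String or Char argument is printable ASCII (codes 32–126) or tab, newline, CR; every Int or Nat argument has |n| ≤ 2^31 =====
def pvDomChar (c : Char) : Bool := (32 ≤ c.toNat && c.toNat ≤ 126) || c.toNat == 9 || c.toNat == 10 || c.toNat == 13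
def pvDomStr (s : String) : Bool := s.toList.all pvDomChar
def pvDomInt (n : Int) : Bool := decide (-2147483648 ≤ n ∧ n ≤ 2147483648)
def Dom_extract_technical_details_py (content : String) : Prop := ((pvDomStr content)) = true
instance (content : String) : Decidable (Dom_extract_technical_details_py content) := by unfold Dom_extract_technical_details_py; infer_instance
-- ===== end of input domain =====

-- B replaces A's chain of seven if/append statements by a declarative rules table folded by one
-- comprehension (objective: simpler); B checks the numeric tokens in the lowercased content, which
-- is proved equivalent since they contain no letters.

-- ===== PORT A =====
def extract_technical_details_py (content : String) : String :=
  let content_lower := PySem.Str.lower content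
  let details : List String := []
  let details := if PySem.Str.isIn "jwt" content_lower || PySem.Str.isIn "token" content_lower
    then details ++ ["JWT token authentication"] else details
  let details := if PySem.Str.isIn "impaired communication" content_lower
    then details ++ ["communication issues"] else details
  let details := if PySem.Str.isIn "authentication" content_lower
    then details ++ ["authentication problems"] else details
  let details := if PySem.Str.isIn "reset" content_lower && PySem.Str.isIn "auth" content_lower
    then details ++ ["authentication reset required"] else details
  let details := if PySem.Str.isIn "machines" content_lower &&
      (["300", "304", "100+", "200+"].any (fun num => PySem.Str.isIn num content))
    then details ++ ["large scale deployment"] else details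
  let details := if PySem.Str.isIn "defender" content_lower
    then details ++ ["Microsoft Defender for Endpoint"] else details
  let details := if PySem.Str.isIn "macos" content_lower || PySem.Str.isIn "mac os" content_lower
    then details ++ ["macOS platform"] else details
  if details ≠ [] then PySem.Str.join ", " details else ""

-- ===== PORT B =====
def pvRules : List (List (List String) × String) :=
  [ ([["jwt", "token"]], "JWT token authentication"),
    ([["impaired communication"]], "communication issues"),
    ([["authentication"]], "authentication problems"),
    ([["reset"], ["auth"]], "authentication reset required"),
    ([["machines"], ["300", "304", "100+", "200+"]], "large scale deployment"),
    ([["defender"]], "Microsoft Defender for Endpoint"),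
    ([["macos", "mac os"]], "macOS platform") ]

def extract_technical_details_py_alt (content : String) : String :=
  let low := PySem.Str.lower content
  PySem.Str.join ", "
    ((pvRules.filter
        (fun r => r.1.all (fun g => g.any (fun k => PySem.Str.isIn k low)))).map
      (fun r => r.2))

-- ===== PRECONDITION & SPEC =====
def Spec_extract_technical_details_py (content : String) (out : String) : Prop := out = extract_technical_details_py_alt content
instance (content : String) (out : String) : Decidable (Spec_extract_technical_details_py content out) := by unfold Spec_extract_technical_details_py; infer_instance

-- ===== CLAIM (what is proved, stated in full; the proofs are below) =====
def Claim_equal_extract_technical_details_py : Prop := ∀ (content : String), Dom_extract_technical_details_py content → Spec_extract_technical_details_py content (extract_technical_details_py content)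

-- ===== LEMMAS AND PROOFS =====
set_option maxRecDepth 100000
set_option maxHeartbeats 2000000

-- lowerChar fixes every character below 'A' (code 65), and nothing else maps onto one
theorem pv_lowerChar_eq_iff (c x : Char) (hc : c.toNat < 65) :
    PySem.Chars.lowerChar x = c ↔ x = c := by
  unfold PySem.Chars.lowerChar PySem.Chars.isupper
  split_ifs with h
  · simp only [Bool.and_eq_true, decide_eq_true_eq] at h
    have h1 : 65 ≤ x.toNat := by
      have := h.1; rw [Char.le_def, UInt32.le_iff_toNat_le] at this; exact this
    have h2 : x.toNat ≤ 90 := by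
      have := h.2; rw [Char.le_def, UInt32.le_iff_toNat_le] at this; exact this
    constructor
    · intro he
      exfalso
      have ht : (Char.ofNat (x.toNat + 32)).toNat = c.toNat := by rw [he]
      have hv : (x.toNat + 32).isValidChar := by unfold Nat.isValidChar; omega
      rw [Char.toNat_ofNat, if_pos hv] at ht
      omega
    · intro he
      exfalso
      have : x.toNat = c.toNat := by rw [he]
      omega
  · exact Iff.rfl

theorem pv_prefix_lower (p : List Char) (hp : ∀ c ∈ p, c.toNat < 65) :
    ∀ s : List Char, (p <+: List.map PySem.Chars.lowerChar s) ↔ p <+: s := by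
  induction p with
  | nil => intro s; simp
  | cons c p ih =>
    intro s
    cases s with
    | nil => simp
    | cons a t =>
      simp only [List.map_cons, List.cons_prefix_cons]
      constructor
      · rintro ⟨h1, h2⟩
        exact ⟨((pv_lowerChar_eq_iff c a (hp c (List.mem_cons_self))).mp h1.symm).symm,
          (ih (fun d hd => hp d (List.mem_cons_of_mem _ hd)) t).mp h2⟩
      · rintro ⟨h1, h2⟩
        exact ⟨((pv_lowerChar_eq_iff c a (hp c (List.mem_cons_self))).mpr h1.symm).symm,
          (ih (fun d hd => hp d (List.mem_cons_of_mem _ hd)) t).mpr h2⟩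

theorem pv_infix_lower (p : List Char) (hp : ∀ c ∈ p, c.toNat < 65) :
    ∀ s : List Char, (p <:+: List.map PySem.Chars.lowerChar s) ↔ p <:+: s := by
  intro s
  induction s with
  | nil => simp
  | cons a t ih =>
    simp only [List.map_cons, List.infix_cons_iff]
    constructor
    · rintro (h | h)
      · exact Or.inl ((pv_prefix_lower p hp (a :: t)).mp (by simpa using h))
      · exact Or.inr (ih.mp h)
    · rintro (h | h)
      · exact Or.inl (by simpa using (pv_prefix_lower p hp (a :: t)).mpr h)
      · exact Or.inr (ih.mpr h)

theorem pv_isIn_lower (n : String) (hp : ∀ c ∈ n.toList, c.toNat < 65) (s : String) :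
    PySem.Str.isIn n (PySem.Str.lower s) = PySem.Str.isIn n s := by
  simp only [PySem.Str.isIn, PySem.Str.lower, PySem.Chars.lower, String.toList_ofList]
  rw [Bool.eq_iff_iff, PySem.Chars.isIn_iff_infix, PySem.Chars.isIn_iff_infix]
  exact pv_infix_lower n.toList hp s.toList

theorem pv_chars_300 : ∀ c ∈ "300".toList, c.toNat < 65 := by
  have h : "300".toList = ['3','0','0'] := by decide
  rw [h]; simp only [List.forall_mem_cons]
  exact ⟨by decide, by decide, by decide, by simp⟩

theorem pv_chars_304 : ∀ c ∈ "304".toList, c.toNat < 65 := by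
  have h : "304".toList = ['3','0','4'] := by decide
  rw [h]; simp only [List.forall_mem_cons]
  exact ⟨by decide, by decide, by decide, by simp⟩

theorem pv_chars_100 : ∀ c ∈ "100+".toList, c.toNat < 65 := by
  have h : "100+".toList = ['1','0','0','+'] := by decide
  rw [h]; simp only [List.forall_mem_cons]
  exact ⟨by decide, by decide, by decide, by decide, by simp⟩

theorem pv_chars_200 : ∀ c ∈ "200+".toList, c.toNat < 65 := by
  have h : "200+".toList = ['2','0','0','+'] := by decide
  rw [h]; simp only [List.forall_mem_cons]
  exact ⟨by decide, by decide, by decide, by decide, by simp⟩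

theorem pv_map_filter {a : Type} (p : a → Bool) (f : a → String) (rs : List a) :
    List.map f (List.filter p rs) =
      rs.foldr (fun r acc => (if p r then [f r] else []) ++ acc) [] := by
  induction rs with
  | nil => rfl
  | cons r rs ih =>
    simp only [List.filter_cons, List.foldr_cons]
    by_cases h : p r = true
    · simp [h, ih]
    · simp [h, ih]

-- A's let/if/append chain, with the seven conditions abstracted as Bools, equals the join of
-- the concatenated per-rule singleton lists (the shape B's filter/map produces).
theorem pv_core (b1 b2 b3 b4 b5 b6 b7 : Bool) :
    (let details : List String := []
     let details := if b1 then details ++ ["JWT token authentication"] else details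
     let details := if b2 then details ++ ["communication issues"] else details
     let details := if b3 then details ++ ["authentication problems"] else details
     let details := if b4 then details ++ ["authentication reset required"] else details
     let details := if b5 then details ++ ["large scale deployment"] else details
     let details := if b6 then details ++ ["Microsoft Defender for Endpoint"] else details
     let details := if b7 then details ++ ["macOS platform"] else details
     if details ≠ [] then PySem.Str.join ", " details else "") =
    PySem.Str.join ", "
      ((if b1 then ["JWT token authentication"] else []) ++
        ((if b2 then ["communication issues"] else []) ++
          ((if b3 then ["authentication problems"] else []) ++
            ((if b4 then ["authentication reset required"] else []) ++
              ((if b5 then ["large scale deployment"] else []) ++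
                ((if b6 then ["Microsoft Defender for Endpoint"] else []) ++
                  ((if b7 then ["macOS platform"] else []) ++ []))))))) := by
  cases b1 <;> cases b2 <;> cases b3 <;> cases b4 <;> cases b5 <;> cases b6 <;> cases b7 <;> rfl

-- ===== VERDICT (by name: the statement is the Claim_ definition above) =====
theorem extract_technical_details_py_spec : Claim_equal_extract_technical_details_py := by
  intro content _
  unfold Spec_extract_technical_details_py
  have hA := pv_core
    (PySem.Str.isIn "jwt" (PySem.Str.lower content) || PySem.Str.isIn "token" (PySem.Str.lower content))
    (PySem.Str.isIn "impaired communication" (PySem.Str.lower content))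
    (PySem.Str.isIn "authentication" (PySem.Str.lower content))
    (PySem.Str.isIn "reset" (PySem.Str.lower content) && PySem.Str.isIn "auth" (PySem.Str.lower content))
    (PySem.Str.isIn "machines" (PySem.Str.lower content) &&
      (["300", "304", "100+", "200+"].any (fun num => PySem.Str.isIn num content)))
    (PySem.Str.isIn "defender" (PySem.Str.lower content))
    (PySem.Str.isIn "macos" (PySem.Str.lower content) || PySem.Str.isIn "mac os" (PySem.Str.lower content))
  have hA' : extract_technical_details_py content =
      PySem.Str.join ", "
        ((if (PySem.Str.isIn "jwt" (PySem.Str.lower content) || PySem.Str.isIn "token" (PySem.Str.lower content)) then ["JWT token authentication"] else []) ++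
          ((if PySem.Str.isIn "impaired communication" (PySem.Str.lower content) then ["communication issues"] else []) ++
            ((if PySem.Str.isIn "authentication" (PySem.Str.lower content) then ["authentication problems"] else []) ++
              ((if (PySem.Str.isIn "reset" (PySem.Str.lower content) && PySem.Str.isIn "auth" (PySem.Str.lower content)) then ["authentication reset required"] else []) ++
                ((if (PySem.Str.isIn "machines" (PySem.Str.lower content) &&
                      (["300", "304", "100+", "200+"].any (fun num => PySem.Str.isIn num content))) then ["large scale deployment"] else []) ++
                  ((if PySem.Str.isIn "defender" (PySem.Str.lower content) then ["Microsoft Defender for Endpoint"] else []) ++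
                    ((if (PySem.Str.isIn "macos" (PySem.Str.lower content) || PySem.Str.isIn "mac os" (PySem.Str.lower content)) then ["macOS platform"] else []) ++ []))))))) := hA
  rw [hA']
  simp only [extract_technical_details_py_alt]
  rw [pv_map_filter]
  simp only [pvRules, List.foldr_cons, List.foldr_nil, List.all_cons, List.all_nil,
    List.any_cons, List.any_nil, Bool.or_false, Bool.and_true]
  rw [pv_isIn_lower "300" pv_chars_300 content, pv_isIn_lower "304" pv_chars_304 content,
      pv_isIn_lower "100+" pv_chars_100 content, pv_isIn_lower "200+" pv_chars_200 content]
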